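-- pv_equiv track=rewrite | github.com/DanielVajnagi/university | 4_Semester/Comp_Graphics/Lab1/main.py | line_polygon_intersection
-- ===== SOURCE A (Python) =====
-- def line_polygon_intersection(A, B, C, P):
--     n = len(P)
--     last = n-1
--     intersect = False
--
--     for i in range(n):
--         xi, yi = P[i]
--         xj, yj = P[(i+1) % n]
--         Ai = A*xi + B*yi + C
--         Aj = A*xj + B*yj + C
--
--         if Ai * Aj <= 0:
--             intersect = True
--             break
--         elif Ai == 0 or Aj == 0:
--             intersect = True
--             break
--
--     return intersect
-- ===== SOURCE B (Python) =====
-- def line_polygon_intersection(A, B, C, P):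
--     ds = [A*x + B*y + C for x, y in P]
--     return any(d <= 0 for d in ds) and any(d >= 0 for d in ds)
-- ===== Notes on version B (the rewrite author's own statement) =====
-- stated objective: simpler
-- what changed: Replaces the cyclic consecutive-pair product scan with a global sign-uniformity test: compute all signed distances and return True iff they are not all strictly positive and not all strictly negative.
import Mathlib
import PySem

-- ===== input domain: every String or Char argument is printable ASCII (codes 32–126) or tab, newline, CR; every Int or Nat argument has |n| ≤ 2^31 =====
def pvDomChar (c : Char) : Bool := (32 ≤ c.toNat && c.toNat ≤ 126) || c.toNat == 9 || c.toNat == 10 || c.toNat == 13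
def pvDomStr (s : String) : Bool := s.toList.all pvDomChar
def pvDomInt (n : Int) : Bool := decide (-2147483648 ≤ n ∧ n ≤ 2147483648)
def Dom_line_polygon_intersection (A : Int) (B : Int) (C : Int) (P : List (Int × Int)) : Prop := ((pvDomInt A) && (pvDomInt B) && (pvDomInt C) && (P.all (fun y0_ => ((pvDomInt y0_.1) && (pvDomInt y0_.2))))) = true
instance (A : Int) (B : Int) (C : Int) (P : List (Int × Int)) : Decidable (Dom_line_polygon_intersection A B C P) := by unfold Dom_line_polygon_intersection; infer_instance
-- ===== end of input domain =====

-- B replaces A's cyclic consecutive-pair product scan by a global sign-uniformity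
-- test over all vertices (simpler decomposition, same O(n) cost).

-- ===== PORT A =====
-- the loop `for i in range(n)` with early break; k counts the remaining iterations,
-- so the current index is n - k - ... i.e. i = n - (k+1); indices are always in range,
-- so List.getD matches Python's P[i] / P[(i+1) % n] exactly.
def pvLoopA (A B C : Int) (P : List (Int × Int)) (n : Nat) : Nat → Bool
  | 0 => false
  | (k+1) =>
    let i := n - (k+1)
    let pi := P.getD i (0, 0)
    let pj := P.getD ((i+1) % n) (0, 0)
    let Ai := A * pi.1 + B * pi.2 + C
    let Aj := A * pj.1 + B * pj.2 + C
    if Ai * Aj ≤ 0 then true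
    else if Ai = 0 ∨ Aj = 0 then true
    else pvLoopA A B C P n k

def line_polygon_intersection (A : Int) (B : Int) (C : Int) (P : List (Int × Int)) : Bool :=
  pvLoopA A B C P P.length P.length

-- ===== PORT B =====
def line_polygon_intersection_alt (A : Int) (B : Int) (C : Int) (P : List (Int × Int)) : Bool :=
  let ds := P.map (fun p => A * p.1 + B * p.2 + C)
  (ds.any (fun d => d ≤ 0)) && (ds.any (fun d => 0 ≤ d))

-- ===== PRECONDITION & SPEC =====
def Spec_line_polygon_intersection (A : Int) (B : Int) (C : Int) (P : List (Int × Int)) (out : Bool) : Prop := out = line_polygon_intersection_alt A B C P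
instance (A : Int) (B : Int) (C : Int) (P : List (Int × Int)) (out : Bool) : Decidable (Spec_line_polygon_intersection A B C P out) := by unfold Spec_line_polygon_intersection; infer_instance

-- ===== CLAIM (what is proved, stated in full; the proofs are below) =====
def Claim_equal_line_polygon_intersection : Prop := ∀ (A : Int) (B : Int) (C : Int) (P : List (Int × Int)), Dom_line_polygon_intersection A B C P → Spec_line_polygon_intersection A B C P (line_polygon_intersection A B C P)

-- ===== LEMMAS AND PROOFS =====

-- the signed value of vertex i
def pvF (A B C : Int) (P : List (Int × Int)) (i : Nat) : Int :=
  A * (P.getD i (0, 0)).1 + B * (P.getD i (0, 0)).2 + C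

-- characterisation of A's loop
lemma pvLoopA_iff (A B C : Int) (P : List (Int × Int)) (k : Nat) (hk : k ≤ P.length) :
    pvLoopA A B C P P.length k = true ↔
      ∃ i, P.length - k ≤ i ∧ i < P.length ∧
        pvF A B C P i * pvF A B C P ((i+1) % P.length) ≤ 0 := by
  induction k with
  | zero =>
    simp [pvLoopA]
    intro i h1 h2
    omega
  | succ k ih =>
    have hk' : k ≤ P.length := by omega
    rw [pvLoopA]
    by_cases h1 : pvF A B C P (P.length - (k+1)) *
        pvF A B C P ((P.length - (k+1) + 1) % P.length) ≤ 0
    · have h1' := h1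
      simp only [pvF] at h1'
      simp only [h1', if_true]
      constructor
      · intro _
        exact ⟨P.length - (k+1), le_refl _, by omega, h1⟩
      · intro _; trivial
    · have h1' := h1
      simp only [pvF] at h1'
      simp only [h1', if_false]
      have h2 : ¬ (A * (P.getD (P.length - (k+1)) (0, 0)).1 +
            B * (P.getD (P.length - (k+1)) (0, 0)).2 + C = 0 ∨
          A * (P.getD ((P.length - (k+1) + 1) % P.length) (0, 0)).1 +
            B * (P.getD ((P.length - (k+1) + 1) % P.length) (0, 0)).2 + C = 0) := by
        rintro (h | h)
        · exact h1' (by rw [h, zero_mul])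
        · exact h1' (by rw [h, mul_zero])
      simp only [h2, if_false]
      rw [ih hk']
      constructor
      · rintro ⟨i, hi1, hi2, hi3⟩
        exact ⟨i, by omega, hi2, hi3⟩
      · rintro ⟨i, hi1, hi2, hi3⟩
        refine ⟨i, ?_, hi2, hi3⟩
        rcases Nat.eq_or_lt_of_le hi1 with h | h
        · exfalso
          rw [← h] at hi3
          exact h1 hi3
        · omega

-- the crossing lemma: mixed signs on 0..n-1 give a consecutive (cyclic) nonpositive product
lemma pvCrossing (n : Nat) (f : Nat → Int)
    (hj : ∃ j, j < n ∧ f j ≤ 0) (hl : ∃ l, l < n ∧ 0 ≤ f l) :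
    ∃ i, i < n ∧ f i * f ((i+1) % n) ≤ 0 := by
  obtain ⟨j, hjn, hjv⟩ := hj
  obtain ⟨l, hln, hlv⟩ := hl
  have hn : 0 < n := by omega
  by_cases h0 : f 0 ≤ 0
  · -- least index with nonnegative value
    have hex : ∃ m, m < n ∧ 0 ≤ f m := ⟨l, hln, hlv⟩
    obtain ⟨hmn, hmv⟩ := Nat.find_spec hex
    rcases hNk : Nat.find hex with _ | m'
    · rw [hNk] at hmv
      have hz : f 0 = 0 := le_antisymm h0 hmv
      exact ⟨0, hn, by rw [hz, zero_mul]⟩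
    · rw [hNk] at hmn hmv
      have hmin := Nat.find_min hex (m := m') (by omega)
      have hm'n : m' < n := by omega
      have hm'v : f m' ≤ 0 := by
        by_contra hc
        exact hmin ⟨hm'n, by omega⟩
      refine ⟨m', hm'n, ?_⟩
      rw [Nat.mod_eq_of_lt (by omega : m' + 1 < n)]
      exact mul_nonpos_iff.mpr (Or.inr ⟨hm'v, hmv⟩)
  · -- f 0 > 0 : least index with nonpositive value
    have h0' : 0 < f 0 := by omega
    have hex : ∃ m, m < n ∧ f m ≤ 0 := ⟨j, hjn, hjv⟩
    obtain ⟨hmn, hmv⟩ := Nat.find_spec hex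
    rcases hNk : Nat.find hex with _ | m'
    · rw [hNk] at hmv
      exact absurd hmv (by omega)
    · rw [hNk] at hmn hmv
      have hmin := Nat.find_min hex (m := m') (by omega)
      have hm'n : m' < n := by omega
      have hm'v : 0 ≤ f m' := by
        by_contra hc
        exact hmin ⟨hm'n, by omega⟩
      refine ⟨m', hm'n, ?_⟩
      rw [Nat.mod_eq_of_lt (by omega : m' + 1 < n)]
      exact mul_nonpos_iff.mpr (Or.inl ⟨hm'v, hmv⟩)

lemma pvAlt_iff (A B C : Int) (P : List (Int × Int)) :
    line_polygon_intersection_alt A B C P = true ↔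
      (∃ j, j < P.length ∧ pvF A B C P j ≤ 0) ∧
      (∃ l, l < P.length ∧ 0 ≤ pvF A B C P l) := by
  simp only [line_polygon_intersection_alt, List.any_map, List.any_eq_true,
    Function.comp, decide_eq_true_eq, Bool.and_eq_true]
  constructor
  · rintro ⟨⟨p, hp, hp0⟩, ⟨q, hq, hq0⟩⟩
    obtain ⟨j, hj, hjp⟩ := List.mem_iff_getElem.mp hp
    obtain ⟨l, hl, hlq⟩ := List.mem_iff_getElem.mp hq
    refine ⟨⟨j, hj, ?_⟩, ⟨l, hl, ?_⟩⟩
    · unfold pvF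
      rw [List.getD_eq_getElem P (0, 0) hj, hjp]
      exact hp0
    · unfold pvF
      rw [List.getD_eq_getElem P (0, 0) hl, hlq]
      exact hq0
  · rintro ⟨⟨j, hj, hjv⟩, ⟨l, hl, hlv⟩⟩
    unfold pvF at hjv hlv
    rw [List.getD_eq_getElem P (0, 0) hj] at hjv
    rw [List.getD_eq_getElem P (0, 0) hl] at hlv
    exact ⟨⟨P[j], List.getElem_mem hj, hjv⟩, ⟨P[l], List.getElem_mem hl, hlv⟩⟩

lemma pvMain (A B C : Int) (P : List (Int × Int)) :
    line_polygon_intersection A B C P = line_polygon_intersection_alt A B C P := by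
  rw [Bool.eq_iff_iff]
  rw [show line_polygon_intersection A B C P = pvLoopA A B C P P.length P.length from rfl]
  rw [pvLoopA_iff A B C P P.length (le_refl _), pvAlt_iff]
  constructor
  · rintro ⟨i, _, hi, hprod⟩
    have hi1 : (i+1) % P.length < P.length := Nat.mod_lt _ (by omega)
    rcases mul_nonpos_iff.mp hprod with ⟨h1, h2⟩ | ⟨h1, h2⟩
    · exact ⟨⟨(i+1) % P.length, hi1, h2⟩, ⟨i, hi, h1⟩⟩
    · exact ⟨⟨i, hi, h1⟩, ⟨(i+1) % P.length, hi1, h2⟩⟩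
  · rintro ⟨hj, hl⟩
    obtain ⟨i, hi, hp⟩ := pvCrossing P.length (pvF A B C P) hj hl
    exact ⟨i, by omega, hi, hp⟩

-- ===== VERDICT (by name: the statement is the Claim_ definition above) =====
theorem line_polygon_intersection_spec : Claim_equal_line_polygon_intersection := by
  intro A B C P _
  unfold Spec_line_polygon_intersection
  exact pvMain A B C P
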